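-- pv_equiv track=rewrite | github.com/niefy/LeetCodeExam | weekly_contest/151/NumSmallerByFrequency.py | f
-- ===== SOURCE A (Python) =====
-- def f(str):#函数f(s)
--     min=str[0]
--     count=0
--     for s in str:
--         if s<min:
--             min=s
--             count=1
--         elif s==min:
--             count+=1
--     return count
-- ===== SOURCE B (Python) =====
-- def f(str):
--     # Two separate passes: find the minimum character, then count its occurrences.
--     m = str[0]
--     for s in str:
--         if s < m:
--             m = s
--     return str.count(m)
-- ===== Notes on version B (the rewrite author's own statement) =====
-- stated objective: simpler
-- what changed: Replaces A's fused min-tracking-with-count-reset loop by two independent passes: a plain minimum scan followed by str.count(m), dropping the count-reset invariant entirely.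
-- outside the precondition, e.g. on f(''): A raises IndexError, B raises IndexError
import Mathlib
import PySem

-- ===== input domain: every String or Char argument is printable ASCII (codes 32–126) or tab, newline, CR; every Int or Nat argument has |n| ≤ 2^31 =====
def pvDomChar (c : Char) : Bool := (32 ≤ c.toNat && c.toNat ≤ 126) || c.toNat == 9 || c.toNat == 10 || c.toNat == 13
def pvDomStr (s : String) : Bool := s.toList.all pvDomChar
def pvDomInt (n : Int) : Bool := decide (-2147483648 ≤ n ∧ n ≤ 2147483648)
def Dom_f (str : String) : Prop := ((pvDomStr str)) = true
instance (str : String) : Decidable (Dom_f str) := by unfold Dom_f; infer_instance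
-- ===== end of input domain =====

-- B replaces A's fused min-and-count loop (with count reset on a new minimum) by two
-- separate passes: a plain minimum scan, then str.count of that minimum (objective: simpler).


-- ===== PORT A =====
-- min = str[0]; count = 0; for s in str: if s < min: min = s; count = 1
-- elif s == min: count += 1; return count
def f (str : String) : Int :=
  match PySem.Str.pyGet? str 0 with
  | none => 0   -- IndexError in Python: excluded by Pre_f
  | some m0 =>
    (str.toList.foldl
      (fun (st : Char × Int) s =>
        if s < st.1 then (s, 1)
        else if s = st.1 then (st.1, st.2 + 1)
        else st)
      (m0, 0)).2

-- ===== PORT B =====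
-- m = str[0]; for s in str: if s < m: m = s; return str.count(m)
def f_alt (str : String) : Int :=
  match PySem.Str.pyGet? str 0 with
  | none => 0   -- IndexError in Python: excluded by Pre_f
  | some m0 =>
    (PySem.Str.count str (String.ofList [str.toList.foldl (fun m s => if s < m then s else m) m0]) : Int)

-- ===== PRECONDITION & SPEC =====
-- Pre_f excludes only the empty string, on which both Pythons raise IndexError at str[0].
def Pre_f (str : String) : Prop := str ≠ ""
instance (str : String) : Decidable (Pre_f str) := by unfold Pre_f; infer_instance
def pvWitness_f : String := "aba"
def Spec_f (str : String) (out : Int) : Prop := out = f_alt str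
instance (str : String) (out : Int) : Decidable (Spec_f str out) := by unfold Spec_f; infer_instance

-- ===== CLAIM (what is proved, stated in full; the proofs are below) =====
def Claim_equal_f : Prop := ∀ (str : String), Dom_f str → Pre_f str → Spec_f str (f str)

-- ===== LEMMAS AND PROOFS =====

-- Python's str.count with a single-character needle is the plain element count
theorem count_go_single (c : Char) (t : List Char) (acc : Nat) :
    PySem.Chars.count.go [c] t.length t acc = acc + t.count c := by
  induction t generalizing acc with
  | nil => simp [PySem.Chars.count.go]
  | cons x t ih =>
    simp only [List.length_cons, PySem.Chars.count.go, List.isPrefixOf]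
    by_cases h : c = x
    · subst h
      simp [ih]
      omega
    · have hb : (c == x) = false := by simp [h]
      have hx : ¬ x = c := fun hh => h hh.symm
      simp [hb, ih, hx]

theorem str_count_single (s : String) (c : Char) :
    PySem.Str.count s (String.ofList [c]) = s.toList.count c := by
  have h := count_go_single c s.toList 0
  simp only [PySem.Str.count_eq, PySem.Chars.count]
  simpa using h

-- the min-only fold never increases its accumulator
theorem minfold_le (l : List Char) (m : Char) :
    l.foldl (fun m s => if s < m then s else m) m ≤ m := by
  induction l generalizing m with
  | nil => simp
  | cons x t ih =>
    simp only [List.foldl_cons]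
    by_cases h : x < m
    · simp only [if_pos h]
      exact le_trans (ih x) (le_of_lt h)
    · simp only [if_neg h]
      exact ih m

-- A's fused loop computes (running minimum, count of that minimum), stated via B's pieces
theorem fused_loop (l : List Char) (m : Char) (c : Int) :
    l.foldl (fun (st : Char × Int) s =>
        if s < st.1 then (s, 1)
        else if s = st.1 then (st.1, st.2 + 1)
        else st) (m, c)
      = (l.foldl (fun m s => if s < m then s else m) m,
         if l.foldl (fun m s => if s < m then s else m) m = m
         then c + (l.count m : Int)
         else (l.count (l.foldl (fun m s => if s < m then s else m) m) : Int)) := by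
  induction l generalizing m c with
  | nil => simp
  | cons x t ih =>
    simp only [List.foldl_cons]
    by_cases hx : x < m
    · simp only [if_pos hx]
      rw [ih]
      have hle := minfold_le t x
      have hne : t.foldl (fun m s => if s < m then s else m) x ≠ m := by
        intro h; rw [h] at hle; exact absurd (lt_of_lt_of_le hx hle) (lt_irrefl _)
      have hxm : ¬ x = m := ne_of_lt hx
      by_cases hM : t.foldl (fun m s => if s < m then s else m) x = x
      · simp [hM, hxm]
        omega
      · simp [hM, hne, Ne.symm hM]
    · simp only [if_neg hx]
      by_cases he : x = m
      · subst he
        rw [ih]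
        by_cases hM : t.foldl (fun m s => if s < m then s else m) x = x
        · simp [hM]
          omega
        · simp [hM, Ne.symm hM]
      · simp only [if_neg he]
        rw [ih]
        by_cases hM : t.foldl (fun m s => if s < m then s else m) m = m
        · simp [hM, he]
        · have hlt : t.foldl (fun m s => if s < m then s else m) m < m :=
            lt_of_le_of_ne (minfold_le t m) hM
          have hmx : m ≤ x := le_of_not_gt hx
          have hne2 : t.foldl (fun m s => if s < m then s else m) m ≠ x := by
            intro h; rw [h] at hlt; exact absurd (lt_of_le_of_lt hmx hlt) (lt_irrefl _)
          simp [hM, Ne.symm hne2]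

-- ===== VERDICT (by name: the statement is the Claim_ definition above) =====
theorem f_spec : Claim_equal_f := by
  intro str _ hpre
  unfold Spec_f f f_alt
  obtain ⟨a, t, hl⟩ : ∃ a t, str.toList = a :: t := by
    cases h : str.toList with
    | nil => exact absurd (String.toList_eq_nil_iff.mp h) hpre
    | cons a t => exact ⟨a, t, rfl⟩
  have hget : PySem.Str.pyGet? str 0 = some a := by
    simp [PySem.Str.pyGet?_eq, hl, PySem.Chars.pyGet?]
  rw [hget]
  dsimp only
  rw [str_count_single, fused_loop, hl]
  simp only [List.foldl_cons, if_neg (lt_irrefl a)]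
  by_cases hM : t.foldl (fun m s => if s < m then s else m) a = a
  · simp [hM]
  · simp [hM]
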